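-- pv_equiv track=rewrite | github.com/Gitrequest/FloatLicenseEvaluation | csvlf.py | loginpd
-- ===== SOURCE A (Python) =====
-- def loginpd(n, dates, events):
--     counter = 0
--     maxlogs = 0
--     for num, x in enumerate(dates):
--         if n == x:
--             if events[num] == "login":
--                 counter += 1
--                 if counter > maxlogs:
--                     maxlogs = counter
--             elif events[num] == "logout":
--                 counter -= 1
--     return maxlogs
-- ===== SOURCE B (Python) =====
-- def loginpd(n, dates, events):
--     # Two-phase decomposition: build the +1/-1 delta table for day n,
--     # then take the max of 0 and the prefix sums of that table.
--     deltas = []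
--     for i, x in enumerate(dates):
--         if x == n:
--             e = events[i]
--             if e == "login":
--                 deltas.append(1)
--             elif e == "logout":
--                 deltas.append(-1)
--     prefix = []
--     s = 0
--     for d in deltas:
--         s += d
--         prefix.append(s)
--     return max([0] + prefix)
-- ===== Notes on version B (the rewrite author's own statement) =====
-- stated objective: alternative
-- what changed: A's single interleaved counter-plus-running-max loop is replaced by a two-phase decomposition: first build the +1/-1 delta table for the matching day, then take the maximum of 0 and the prefix sums of that table.
import Mathlib
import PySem

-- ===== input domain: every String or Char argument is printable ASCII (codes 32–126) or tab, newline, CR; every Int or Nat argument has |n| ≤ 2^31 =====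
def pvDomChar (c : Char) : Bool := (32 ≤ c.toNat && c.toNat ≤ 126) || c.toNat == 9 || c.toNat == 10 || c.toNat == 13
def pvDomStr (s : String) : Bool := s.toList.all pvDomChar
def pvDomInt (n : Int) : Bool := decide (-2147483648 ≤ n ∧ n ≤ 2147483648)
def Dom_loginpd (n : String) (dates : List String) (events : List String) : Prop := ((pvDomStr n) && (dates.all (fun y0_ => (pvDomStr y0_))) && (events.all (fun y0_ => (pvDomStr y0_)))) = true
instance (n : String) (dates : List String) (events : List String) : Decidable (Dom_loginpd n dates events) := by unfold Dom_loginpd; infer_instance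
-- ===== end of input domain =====

-- B replaces A's interleaved counter/running-max loop by a two-phase decomposition (delta table, then max of 0 and its prefix sums); equivalence proved on all inputs where A does not raise IndexError.


-- ===== PORT A =====
-- counter/maxlogs loop over enumerate(dates); events[num] is PySem.List.pyGetD (out of range = none/IndexError, excluded by Pre_)
def loginpd (n : String) (dates : List String) (events : List String) : Int :=
  let st := (PySem.List.enumerate dates).foldl
    (fun (st : Int × Int) (p : Int × String) =>
      if n = p.2 then
        if PySem.List.pyGetD events p.1 "" = "login" then
          let counter := st.1 + 1
          (counter, if counter > st.2 then counter else st.2)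
        else if PySem.List.pyGetD events p.1 "" = "logout" then
          (st.1 - 1, st.2)
        else st
      else st)
    (0, 0)
  st.2

-- ===== PORT B =====
-- phase 1: delta table; phase 2: prefix sums; phase 3: max([0] + prefix)
def loginpd_alt (n : String) (dates : List String) (events : List String) : Int :=
  let deltas := (PySem.List.enumerate dates).foldl
    (fun (acc : List Int) (p : Int × String) =>
      if p.2 = n then
        if PySem.List.pyGetD events p.1 "" = "login" then acc ++ [1]
        else if PySem.List.pyGetD events p.1 "" = "logout" then acc ++ [-1]
        else acc
      else acc)
    []
  let pr := deltas.foldl (fun (st : Int × List Int) d => (st.1 + d, st.2 ++ [st.1 + d])) (0, [])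
  (PySem.List.max? ((0 : Int) :: pr.2) (fun y => y)).getD 0

-- ===== PRECONDITION & SPEC =====
-- Pre_ excludes exactly the inputs where Python A raises IndexError: a date entry equal to n at an index ≥ len(events).
def Pre_loginpd (n : String) (dates : List String) (events : List String) : Prop :=
  ∀ i ∈ List.range dates.length, dates.getD i "" = n → i < events.length
instance (n : String) (dates : List String) (events : List String) : Decidable (Pre_loginpd n dates events) := by unfold Pre_loginpd; infer_instance

def pvWitness_loginpd : String × List String × List String :=
  ("d1", ["d1", "d2", "d1"], ["login", "login", "logout"])

def Spec_loginpd (n : String) (dates : List String) (events : List String) (out : Int) : Prop := out = loginpd_alt n dates events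
instance (n : String) (dates : List String) (events : List String) (out : Int) : Decidable (Spec_loginpd n dates events out) := by unfold Spec_loginpd; infer_instance

-- ===== CLAIM (what is proved, stated in full; the proofs are below) =====
def Claim_equal_loginpd : Prop := ∀ (n : String) (dates : List String) (events : List String), Dom_loginpd n dates events → Pre_loginpd n dates events → Spec_loginpd n dates events (loginpd n dates events)

-- ===== LEMMAS AND PROOFS =====

-- the canonical delta list of day n starting at index i
def pvDL (n : String) (events : List String) : Int → List String → List Int
  | _, [] => []
  | i, x :: xs =>
    if x = n then
      if PySem.List.pyGetD events i "" = "login" then 1 :: pvDL n events (i + 1) xs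
      else if PySem.List.pyGetD events i "" = "logout" then (-1) :: pvDL n events (i + 1) xs
      else pvDL n events (i + 1) xs
    else pvDL n events (i + 1) xs

-- the peak of the running sums c+d1, c+d1+d2, … (peak of the empty list is c itself)
def pvPeak : List Int → Int → Int
  | [], c => c
  | d :: ds, c => max (c + d) (pvPeak ds (c + d))

-- the prefix sums starting from s
def pvPS : List Int → Int → List Int
  | [], _ => []
  | d :: ds, s => (s + d) :: pvPS ds (s + d)

theorem pvA_fold (n : String) (events : List String) :
    ∀ (xs : List String) (i c m : Int), c ≤ m →
      ((PySem.List.enumerate xs i).foldl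
        (fun (st : Int × Int) (p : Int × String) =>
          if n = p.2 then
            if PySem.List.pyGetD events p.1 "" = "login" then
              let counter := st.1 + 1
              (counter, if counter > st.2 then counter else st.2)
            else if PySem.List.pyGetD events p.1 "" = "logout" then
              (st.1 - 1, st.2)
            else st
          else st)
        (c, m)).2 = max m (pvPeak (pvDL n events i xs) c) := by
  intro xs
  induction xs with
  | nil => intro i c m h; simp [PySem.List.enumerate_nil, pvDL, pvPeak, max_eq_left h]
  | cons x xs ih =>
    intro i c m h
    rw [PySem.List.enumerate_cons, List.foldl_cons]
    by_cases hx : n = x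
    · subst hx
      simp only [pvDL, if_true]
      by_cases hin : PySem.List.pyGetD events i "" = "login"
      · simp only [hin, if_true]
        rw [ih (i + 1) (c + 1) (if c + 1 > m then c + 1 else m) (by split <;> omega)]
        simp only [pvPeak]
        by_cases hle : c + 1 ≤ m
        · rw [if_neg (by omega), ← max_assoc, max_eq_left hle]
        · rw [if_pos (by omega), ← max_assoc, show max m (c + 1) = c + 1 from max_eq_right (by omega)]
      · simp only [hin, if_false]
        by_cases hout : PySem.List.pyGetD events i "" = "logout"
        · simp only [hout, if_true]
          rw [ih (i + 1) (c - 1) m (by omega)]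
          simp only [pvPeak]
          rw [show c + -1 = c - 1 by ring, ← max_assoc, max_eq_left (by omega : c - 1 ≤ m)]
        · simp only [hout, if_false]
          exact ih (i + 1) c m h
    · simp only [if_neg hx, pvDL, if_neg (fun hxe : x = n => hx hxe.symm)]
      exact ih (i + 1) c m h

theorem pvB_fold (n : String) (events : List String) :
    ∀ (xs : List String) (i : Int) (acc : List Int),
      (PySem.List.enumerate xs i).foldl
        (fun (acc : List Int) (p : Int × String) =>
          if p.2 = n then
            if PySem.List.pyGetD events p.1 "" = "login" then acc ++ [1]
            else if PySem.List.pyGetD events p.1 "" = "logout" then acc ++ [-1]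
            else acc
          else acc)
        acc = acc ++ pvDL n events i xs := by
  intro xs
  induction xs with
  | nil => intro i acc; simp [PySem.List.enumerate_nil, pvDL]
  | cons x xs ih =>
    intro i acc
    rw [PySem.List.enumerate_cons, List.foldl_cons]
    simp only [pvDL]
    split_ifs with hx hin hout
    · rw [ih]; simp
    · rw [ih]; simp
    · exact ih (i + 1) acc
    · exact ih (i + 1) acc

theorem pvPrefix_fold :
    ∀ (l : List Int) (s : Int) (acc : List Int),
      l.foldl (fun (st : Int × List Int) d => (st.1 + d, st.2 ++ [st.1 + d])) (s, acc)
        = (s + l.sum, acc ++ pvPS l s) := by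
  intro l
  induction l with
  | nil => intro s acc; simp [pvPS]
  | cons d ds ih =>
    intro s acc
    rw [List.foldl_cons, ih]
    simp [pvPS, List.sum_cons]; ring

theorem pvMax_ps : ∀ (l : List Int) (s m : Int), s ≤ m →
    (pvPS l s).foldl max m = max m (pvPeak l s) := by
  intro l
  induction l with
  | nil => intro s m h; simp [pvPS, pvPeak, max_eq_left h]
  | cons d ds ih =>
    intro s m h
    simp only [pvPS, pvPeak, List.foldl_cons]
    rw [ih (s + d) (max m (s + d)) (le_max_right _ _), max_assoc]

-- ===== VERDICT (by name: the statement is the Claim_ definition above) =====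
theorem loginpd_spec : Claim_equal_loginpd := by
  intro n dates events _ _
  show loginpd n dates events = loginpd_alt n dates events
  simp only [loginpd, loginpd_alt]
  rw [pvA_fold n events dates 0 0 0 le_rfl, pvB_fold n events dates 0 [],
      List.nil_append, pvPrefix_fold (pvDL n events 0 dates) 0 []]
  simp only [List.nil_append, PySem.List.max?_id_cons, Option.getD_some]
  exact (pvMax_ps (pvDL n events 0 dates) 0 0 le_rfl).symm
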